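-- pv_equiv track=rewrite | github.com/abelvanbergen/AdventofCode | 2015/day12/ex02.py | calc_answer
-- ===== SOURCE A (Python) =====
-- def get_len_token(line):
-- 	i = 1
-- 	count = 1
-- 	while count > 0:
-- 		if (line[i] == '{'):
-- 			count += 1
-- 		if (line[i] == '}'):
-- 			count -= 1
-- 		i += 1
-- 	return i
--
-- def get_len_nbr(line):
-- 	i = 1
-- 	while(i != len(line) and line[i] >= '0' and line[i] <= '9'):
-- 		i += 1
-- 	return i
--
-- def calc_answer(line):
-- 	i = 0
-- 	answer = 0
-- 	while i < len(line):
-- 		if (line[i] == '{'):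
-- 			len_token = get_len_token(line[i:])
-- 			if "red" not in line[i + 1:i + len_token]:
-- 				answer += calc_answer(line[i + 1:i + len_token])
-- 			i += len_token
-- 		elif (line[i] == '-' or (line[i] >= '0' and line[i] <= '9')):
-- 			len_nbr = get_len_nbr(line[i:])
-- 			answer += int(line[i:i + len_nbr])
-- 			i += len_nbr
-- 		i += 1
-- 	return answer
-- ===== SOURCE B (Python) =====
-- def calc_answer(line):
--     n = len(line)
--
--     # Pair every '{' with its '}' in one pass (stack-based brace matching).
--     match = {}
--     stack = []
--     for q, c in enumerate(line):
--         if c == '{':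
--             stack.append(q)
--         elif c == '}' and stack:
--             match[stack.pop()] = q
--
--     # pref[k] = number of positions q < k where "red" starts.
--     pref = [0]
--     cnt = 0
--     for q in range(n):
--         if line[q:q + 3] == "red":
--             cnt += 1
--         pref.append(cnt)
--
--     def span_sum(a, b):
--         # Sum of the values found in line[a:b]; objects containing "red" are dropped.
--         ans = 0
--         i = a
--         while i < b:
--             c = line[i]
--             if c == '{':
--                 e = match[i]
--                 if pref[e + 1] == pref[i + 1]:
--                     ans += span_sum(i + 1, e)
--                 i = e + 2          # step past '}' and the separator after the object
--             elif c == '-' or '0' <= c <= '9':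
--                 j = i + 1
--                 while j < n and '0' <= line[j] <= '9':
--                     j += 1
--                 ans += int(line[i:j])
--                 i = j + 1          # step past the separator after the number
--             else:
--                 i += 1
--         return ans
--
--     return span_sum(0, n)
-- ===== Notes on version B (the rewrite author's own statement) =====
-- stated objective: alternative
-- what changed: A rescans each object with get_len_token on a fresh slice, searches the object's whole span for 'red' at every nesting level and copies slices while recursing; B instead pairs all braces in one stack pass, tabulates prefix counts of 'red' occurrences once, and evaluates in a single pass over global indices where each object's closing brace and its red-test are table lookups. …
-- outside the precondition, e.g. on calc_answer('5-'): A returns 5, B returns 5; on calc_answer('1{'): A returns 1, B returns 1; on calc_answer('{-red}'): A returns 0, B returns 0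
import Mathlib
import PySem

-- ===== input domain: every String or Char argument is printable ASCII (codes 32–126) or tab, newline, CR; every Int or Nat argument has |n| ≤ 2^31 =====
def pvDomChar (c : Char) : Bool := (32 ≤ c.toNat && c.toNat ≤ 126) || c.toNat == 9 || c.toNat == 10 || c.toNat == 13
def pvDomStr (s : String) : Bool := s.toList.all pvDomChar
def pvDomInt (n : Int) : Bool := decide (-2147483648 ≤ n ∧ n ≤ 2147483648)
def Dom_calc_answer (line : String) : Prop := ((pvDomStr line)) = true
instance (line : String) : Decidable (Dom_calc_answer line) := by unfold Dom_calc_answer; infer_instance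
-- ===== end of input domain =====

-- B replaces A's per-object rescans (get_len_token on a fresh slice, a substring search
-- for "red" over each object's whole span at every nesting level, slice copies while
-- recursing) by one stack pass pairing every '{' with its '}', a prefix-count table of
-- "red" occurrences, and a single evaluation pass over global indices (objective:
-- alternative algorithm; return value only, neither side mutates its argument).

-- ===== PORT A =====
-- while loop of get_len_token; `none` = IndexError (unmatched '{')
def getLenTokenAux (s : List Char) (i count : Nat) : Option Nat :=
  if count = 0 then some i
  else
    match h : s[i]? with
    | none => none
    | some c =>
      let count1 := if c = '{' then count + 1 else count
      let count2 := if c = '}' then count1 - 1 else count1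
      getLenTokenAux s (i + 1) count2
termination_by s.length - i
decreasing_by
  have := (List.getElem?_eq_some_iff.mp h).1; omega

def getLenToken (s : List Char) : Option Nat := getLenTokenAux s 1 1

-- while loop of get_len_nbr; Python's `i != len(line)` test: on Python's reachable states
-- i never exceeds len(line), so `s[i]? = none` is exactly `i = len(line)`
def getLenNbrAux (s : List Char) (i : Nat) : Nat :=
  match h : s[i]? with
  | none => i
  | some c => if '0' ≤ c ∧ c ≤ '9' then getLenNbrAux s (i + 1) else i
termination_by s.length - i
decreasing_by
  have := (List.getElem?_eq_some_iff.mp h).1; omega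

def getLenNbr (s : List Char) : Nat := getLenNbrAux s 1

-- the while loop of calc_answer; i = loop index, acc = answer; slices line[a:b] with
-- 0 ≤ a,b are (s.drop a).take (b-a) (PySem.List.slice_natCast); `none` = exception
def calcAAux (s : List Char) (i : Nat) (acc : Int) : Option Int :=
  if hi : i < s.length then
    let c := s[i]
    if c = '{' then
      match getLenToken (s.drop i) with
      | none => none
      | some lt =>
        let inner := (s.drop (i + 1)).take (lt - 1)
        if PySem.Chars.isIn ['r', 'e', 'd'] inner then
          calcAAux s (i + lt + 1) acc
        else
          match calcAAux inner 0 0 with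
          | none => none
          | some v => calcAAux s (i + lt + 1) (acc + v)
    else if c = '-' ∨ ('0' ≤ c ∧ c ≤ '9') then
      let ln := getLenNbr (s.drop i)
      match PySem.Int.ofChars? ((s.drop i).take ln) with
      | none => none
      | some v => calcAAux s (i + ln + 1) (acc + v)
    else
      calcAAux s (i + 1) acc
  else some acc
termination_by (s.length, s.length - i)
decreasing_by
  all_goals first
    | (apply Prod.Lex.left
       have h1 : ((s.drop (i + 1)).take (lt - 1)).length = min (lt - 1) (s.length - (i + 1)) := by
         simp
       omega)
    | (apply Prod.Lex.right
       omega)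

def calc_answer (line : String) : Int := (calcAAux line.toList 0 0).getD 0

-- ===== PORT B =====
-- line[q:q+3] == "red"
def redAt (s : List Char) (q : Nat) : Bool := decide ((s.drop q).take 3 = ['r', 'e', 'd'])

-- the `for q, c in enumerate(line)` loop pairing braces (python list append/pop at the end
-- = head of the Lean list); q is the running index
def bmGo (cs : List Char) (q : Nat) (d : PySem.Dict Nat Nat) (st : List Nat) :
    PySem.Dict Nat Nat × List Nat :=
  match cs with
  | [] => (d, st)
  | c :: rest =>
    if c = '{' then bmGo rest (q + 1) d (q :: st)
    else if c = '}' then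
      match st with
      | [] => bmGo rest (q + 1) d st
      | p :: st' => bmGo rest (q + 1) (d.insert p q) st'
    else bmGo rest (q + 1) d st

def buildMatch (s : List Char) : PySem.Dict Nat Nat := (bmGo s 0 PySem.Dict.empty []).1

-- the `for q in range(n)` loop accumulating pref (list , running counter cnt)
def buildPrefPair (s : List Char) : List Nat × Nat :=
  (List.range s.length).foldl
    (fun pc q =>
      let c' := if redAt s q then pc.2 + 1 else pc.2
      (pc.1 ++ [c'], c'))
    ([0], 0)

def buildPref (s : List Char) : List Nat := (buildPrefPair s).1

-- the inner `while j < n and '0' <= line[j] <= '9'` loop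
def digitEnd (s : List Char) (j : Nat) : Nat :=
  if h : j < s.length then
    if '0' ≤ s[j] ∧ s[j] ≤ '9' then digitEnd s (j + 1) else j
  else j
termination_by s.length - j

-- cited by spanGo's decreasing_by
theorem digitEnd_ge (s : List Char) (j : Nat) : j ≤ digitEnd s j := by
  fun_induction digitEnd <;> omega

-- the while loop of span_sum; ans = accumulator; `none` = KeyError/IndexError; the two
-- `else none` arms are totality guards only (a table produced by buildMatch always has
-- i < e, e < b and both pref reads in range there)
def spanGo (s : List Char) (mt : PySem.Dict Nat Nat) (pref : List Nat) (b i : Nat)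
    (ans : Int) : Option Int :=
  if hi : i < b then
    match s[i]? with
    | none => none
    | some c =>
      if c = '{' then
        match mt.get? i with
        | none => none
        | some e =>
          if hie : i < e ∧ e < b then
            match pref[e + 1]?, pref[i + 1]? with
            | some x, some y =>
              if x = y then
                match spanGo s mt pref e (i + 1) 0 with
                | none => none
                | some v => spanGo s mt pref b (e + 2) (ans + v)
              else spanGo s mt pref b (e + 2) ans
            | _, _ => none
          else none
      else if c = '-' ∨ ('0' ≤ c ∧ c ≤ '9') then
        let j := digitEnd s (i + 1)
        match PySem.Int.ofChars? ((s.drop i).take (j - i)) with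
        | none => none
        | some v => spanGo s mt pref b (j + 1) (ans + v)
      else spanGo s mt pref b (i + 1) ans
  else some ans
termination_by (b, b - i)
decreasing_by
  all_goals first
    | exact Prod.Lex.left _ _ hie.2
    | (apply Prod.Lex.right; omega)
    | (apply Prod.Lex.right
       have h := digitEnd_ge s (i + 1)
       omega)

def calc_answer_alt (line : String) : Int :=
  (spanGo line.toList (buildMatch line.toList) (buildPref line.toList)
    line.toList.length 0 0).getD 0

-- ===== PRECONDITION & SPEC =====
-- helpers for the closed-form precondition (independent of both ports)
def pvDelta (c : Char) : Int := if c = '{' then 1 else if c = '}' then -1 else 0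
def balTo (s : List Char) (b : Nat) : Int := ((s.take b).map pvDelta).sum

-- Pre_ excludes strings containing an unmatched '{' (A: IndexError in get_len_token,
-- B: KeyError) or a '-' not immediately followed by a digit (both: ValueError from int);
-- the exceptions fire only when the scan reaches the offending character, and since
-- reachability is not closed-form the condition is required at every position, so a few
-- strings on which A happens to skip the bad character and return (e.g. "5-", "1{",
-- "{-red}") are excluded too; B returns A's exact value on those as well.
def Pre_calc_answer (line : String) : Prop :=
  (∀ p, p < line.toList.length → line.toList[p]? = some '{' →
      ∃ q, q < line.toList.length ∧ p < q ∧
        balTo line.toList (q + 1) - balTo line.toList (p + 1) < 0) ∧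
  (∀ p, p < line.toList.length → line.toList[p]? = some '-' →
      (line.toList[p + 1]?.any fun c => decide ('0' ≤ c) && decide (c ≤ '9')) = true)

instance (line : String) : Decidable (Pre_calc_answer line) := by
  unfold Pre_calc_answer; infer_instance

def pvWitness_calc_answer : String := "{1,{2},-3}"

def Spec_calc_answer (line : String) (out : Int) : Prop := out = calc_answer_alt line
instance (line : String) (out : Int) : Decidable (Spec_calc_answer line out) := by
  unfold Spec_calc_answer; infer_instance

-- ===== CLAIM (what is proved, stated in full; the proofs are below) =====
def Claim_equal_calc_answer : Prop := ∀ (line : String), Dom_calc_answer line →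
  Pre_calc_answer line → Spec_calc_answer line (calc_answer line)

-- ===== LEMMAS AND PROOFS =====

-- ---- windows (contiguous global-index slices) and basic facts ----
def pvWin (s : List Char) (a b : Nat) : List Char := (s.drop a).take (b - a)

theorem pvWin_len (s : List Char) (a b : Nat) (hab : a ≤ b) (hb : b ≤ s.length) :
    (pvWin s a b).length = b - a := by
  simp [pvWin]; omega

theorem pvWin_getElem? (s : List Char) (a b r : Nat) (hr : r < b - a) :
    (pvWin s a b)[r]? = s[a + r]? := by
  unfold pvWin
  rw [List.getElem?_take_of_lt hr, List.getElem?_drop]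

theorem pvWin_drop (s : List Char) (a b k : Nat) :
    (pvWin s a b).drop k = pvWin s (a + k) b := by
  unfold pvWin
  rw [List.drop_take, List.drop_drop]
  congr 1
  omega

theorem pvWin_take (s : List Char) (a b k : Nat) :
    (pvWin s a b).take k = pvWin s a (min (a + k) b) := by
  unfold pvWin
  rw [List.take_take]
  congr 1
  omega

-- ---- balance and closing positions ----
theorem balTo_succ (s : List Char) (b : Nat) (hb : b < s.length) :
    balTo s (b + 1) = balTo s b + pvDelta s[b] := by
  unfold balTo
  rw [List.take_add_one, List.map_append, List.sum_append]
  simp [List.getElem?_eq_getElem hb]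

theorem pvDelta_cases (c : Char) :
    (c = '{' ∧ pvDelta c = 1) ∨ (c = '}' ∧ pvDelta c = -1) ∨
    (c ≠ '{' ∧ c ≠ '}' ∧ pvDelta c = 0) := by
  by_cases h1 : c = '{'
  · exact Or.inl ⟨h1, by simp [pvDelta, h1]⟩
  by_cases h2 : c = '}'
  · exact Or.inr (Or.inl ⟨h2, by simp [pvDelta, h1, h2]⟩)
  · exact Or.inr (Or.inr ⟨h1, h2, by simp [pvDelta, h1, h2]⟩)

def IsClose (s : List Char) (i d m : Nat) : Prop :=
  i ≤ m ∧ m < s.length ∧ balTo s (m + 1) - balTo s i = -(d : Int) ∧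
  ∀ r, i ≤ r → r ≤ m → balTo s r - balTo s i > -(d : Int)

theorem IC_pos (s : List Char) (i d m : Nat) (h : IsClose s i d m) : 1 ≤ d := by
  have := h.2.2.2 i le_rfl h.1; omega

theorem IC_closebrace (s : List Char) (i d m : Nat) (h : IsClose s i d m) :
    s[m]'(h.2.1) = '}' := by
  obtain ⟨him, hm, heq, hmin⟩ := h
  have hb := balTo_succ s m hm
  have h1 := hmin m him le_rfl
  rcases pvDelta_cases (s[m]'hm) with ⟨hc, hd⟩ | ⟨hc, hd⟩ | ⟨hc1, hc2, hd⟩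
  · omega
  · exact hc
  · omega

-- the character at i cannot itself end the level unless it is '}' at depth exactly d=1
theorem IC_gt (s : List Char) (i d m : Nat) (h : IsClose s i d m)
    (hne : pvDelta (s[i]'(Nat.lt_of_le_of_lt h.1 h.2.1)) ≠ -(d : Int)) : i < m := by
  rcases Nat.lt_or_ge i m with h' | h'
  · exact h'
  · exfalso
    obtain ⟨him, hm, heq, hmin⟩ := h
    have : i = m := by omega
    subst this
    have hb := balTo_succ s i hm
    exact hne (by omega)

theorem IC_self (s : List Char) (i d m : Nat) (h : IsClose s i d m) (him : i = m) :
    d = 1 ∧ s[i]'(Nat.lt_of_le_of_lt h.1 h.2.1) = '}' := by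
  have hd1 := IC_pos s i d m h
  obtain ⟨him', hm, heq, hmin⟩ := h
  subst him
  have hb := balTo_succ s i hm
  rcases pvDelta_cases (s[i]'hm) with ⟨hc, hdel⟩ | ⟨hc, hdel⟩ | ⟨hc1, hc2, hdel⟩
  · omega
  · exact ⟨by omega, hc⟩
  · omega

theorem ISTEP_open (s : List Char) (i d m : Nat) (h : IsClose s i d m)
    (hc : s[i]'(Nat.lt_of_le_of_lt h.1 h.2.1) = '{') : i < m ∧ IsClose s (i + 1) (d + 1) m := by
  have hd1 := IC_pos s i d m h
  have hdel : pvDelta '{' = 1 := by decide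
  have hlt : i < m := IC_gt s i d m h (by rw [hc, hdel]; omega)
  obtain ⟨him, hm, heq, hmin⟩ := h
  have hb := balTo_succ s i (by omega)
  rw [hc, hdel] at hb
  refine ⟨hlt, by omega, hm, by push_cast; omega, ?_⟩
  intro r hr1 hr2
  have := hmin r (by omega) hr2
  push_cast
  omega

theorem ISTEP_close (s : List Char) (i d m : Nat) (h : IsClose s i d m)
    (hc : s[i]'(Nat.lt_of_le_of_lt h.1 h.2.1) = '}') (him : i < m) :
    2 ≤ d ∧ IsClose s (i + 1) (d - 1) m := by
  obtain ⟨him', hm, heq, hmin⟩ := h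
  have hdel : pvDelta '}' = -1 := by decide
  have hb := balTo_succ s i (by omega)
  rw [hc, hdel] at hb
  have h1 := hmin (i + 1) (by omega) (by omega)
  have hd2 : 2 ≤ d := by omega
  refine ⟨hd2, by omega, hm, ?_, ?_⟩
  · omega
  · intro r hr1 hr2
    have := hmin r (by omega) hr2
    omega

theorem ISTEP_other (s : List Char) (i d m : Nat) (h : IsClose s i d m)
    (hc1 : s[i]'(Nat.lt_of_le_of_lt h.1 h.2.1) ≠ '{')
    (hc2 : s[i]'(Nat.lt_of_le_of_lt h.1 h.2.1) ≠ '}') : i < m ∧ IsClose s (i + 1) d m := by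
  have hd1 := IC_pos s i d m h
  have hdel : pvDelta (s[i]'(Nat.lt_of_le_of_lt h.1 h.2.1)) = 0 := by
    rcases pvDelta_cases (s[i]'(Nat.lt_of_le_of_lt h.1 h.2.1)) with ⟨hc, _⟩ | ⟨hc, _⟩ | ⟨_, _, hd⟩
    · exact absurd hc hc1
    · exact absurd hc hc2
    · exact hd
  have hlt : i < m := IC_gt s i d m h (by rw [hdel]; omega)
  obtain ⟨him, hm, heq, hmin⟩ := h
  have hb := balTo_succ s i (by omega)
  rw [hdel] at hb
  refine ⟨hlt, by omega, hm, by omega, ?_⟩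
  intro r hr1 hr2
  have := hmin r (by omega) hr2
  omega

theorem IC_exists (s : List Char)
    (hpre1 : ∀ p, p < s.length → s[p]? = some '{' →
      ∃ q, q < s.length ∧ p < q ∧ balTo s (q + 1) - balTo s (p + 1) < 0)
    (p : Nat) (hp : p < s.length) (hc : s[p] = '{') : ∃ c, IsClose s (p + 1) 1 c := by
  have hex : ∃ q, q < s.length ∧ p < q ∧ balTo s (q + 1) - balTo s (p + 1) < 0 :=
    hpre1 p hp (by rw [List.getElem?_eq_getElem hp, hc])
  classical
  have hspec := Nat.find_spec hex
  have hmin : ∀ q, q < Nat.find hex →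
      ¬(q < s.length ∧ p < q ∧ balTo s (q + 1) - balTo s (p + 1) < 0) :=
    fun q hq => Nat.find_min hex hq
  generalize hgen : Nat.find hex = c at hspec hmin
  obtain ⟨hclen, hpc, hneg⟩ := hspec
  have hge0 : ∀ r, p + 1 ≤ r → r ≤ c → 0 ≤ balTo s r - balTo s (p + 1) := by
    intro r hr1 hr2
    rcases Nat.eq_or_lt_of_le hr1 with he | hlt
    · subst he; omega
    · have := hmin (r - 1) (by omega)
      have hr1' : r - 1 < s.length := by omega
      by_cases hx : balTo s r - balTo s (p + 1) < 0
      · exact absurd ⟨hr1', by omega, by rw [show r - 1 + 1 = r by omega]; exact hx⟩ this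
      · omega
  refine ⟨c, by omega, hclen, ?_, ?_⟩
  · have hb := balTo_succ s c hclen
    have h0 : 0 ≤ balTo s c - balTo s (p + 1) := hge0 c (by omega) le_rfl
    have hdel : -1 ≤ pvDelta (s[c]'hclen) := by
      rcases pvDelta_cases (s[c]'hclen) with ⟨_, hd⟩ | ⟨_, hd⟩ | ⟨_, _, hd⟩ <;> omega
    omega
  · intro r hr1 hr2
    have := hge0 r hr1 hr2
    omega

-- first crossing is unique
theorem IC_unique (s : List Char) (i d m1 m2 : Nat) (h1 : IsClose s i d m1)
    (h2 : IsClose s i d m2) : m1 = m2 := by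
  by_contra hne
  rcases Nat.lt_or_ge m1 m2 with h | h
  · have := h2.2.2.2 (m1 + 1) (by have := h1.1; omega) (by omega)
    have := h1.2.2.1
    omega
  · have hlt : m2 < m1 := by omega
    have := h1.2.2.2 (m2 + 1) (by have := h2.1; omega) (by omega)
    have := h2.2.2.1
    omega

-- a matched '{' strictly inside a depth-1 span closes strictly inside it
theorem IC_nest (s : List Char) (a b q m : Nat) (hab : IsClose s a 1 b)
    (hq1 : a ≤ q) (hq2 : q < b) (hq : q < s.length) (hcq : s[q] = '{')
    (hm : IsClose s (q + 1) 1 m) : m < b := by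
  obtain ⟨hab1, hbn, habx, habmin⟩ := hab
  obtain ⟨hm1, hmn, hmx, hmmin⟩ := hm
  have hbq := balTo_succ s q hq
  have hdel : pvDelta '{' = 1 := by decide
  rw [hcq, hdel] at hbq
  have h0 : balTo s q - balTo s a > -1 := habmin q hq1 (by omega)
  rcases Nat.lt_or_ge m b with h | h
  · exact h
  rcases Nat.eq_or_lt_of_le h with he | hlt
  · exfalso; rw [he] at habx; omega
  · exfalso
    have := hmmin (b + 1) (by omega) (by omega)
    omega

-- ---- get_len_token on a window computes the closing position ----
theorem tok_win (s : List Char) (p M : Nat) (hM : M ≤ s.length) :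
    ∀ k j count m, m + 1 - j ≤ k → p ≤ j → IsClose s j count m → m < M →
      getLenTokenAux (pvWin s p M) (j - p) count = some (m + 1 - p) := by
  intro k
  induction k with
  | zero =>
    intro j count m hk hpj hic hmM
    exact absurd hic.1 (by omega)
  | succ k ih =>
    intro j count m hk hpj hic hmM
    have hcount := IC_pos s j count m hic
    have hjm := hic.1
    have hm := hic.2.1
    have hread : (pvWin s p M)[j - p]? = some (s[j]'(by omega)) := by
      rw [pvWin_getElem? s p M (j - p) (by omega),
        show p + (j - p) = j by omega, List.getElem?_eq_getElem (by omega)]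
    rw [getLenTokenAux, if_neg (by omega : ¬ count = 0)]
    split
    · rename_i hnone; rw [hread] at hnone; exact absurd hnone (by simp)
    rename_i c hc'
    rw [hread] at hc'
    injection hc' with hc''
    subst hc''
    rcases Nat.eq_or_lt_of_le hjm with he | hlt
    · -- j = m : this character closes the token
      obtain ⟨hd1, hcl⟩ := IC_self s j count m hic he
      rw [hcl, hd1]
      show getLenTokenAux (pvWin s p M) (j - p + 1) 0 = some (m + 1 - p)
      rw [getLenTokenAux]
      simp
      omega
    · -- j < m : step
      rcases pvDelta_cases (s[j]'(by omega)) with ⟨hc, _⟩ | ⟨hc, _⟩ | ⟨hc1, hc2, _⟩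
      · obtain ⟨_, hic'⟩ := ISTEP_open s j count m hic hc
        rw [hc]
        show getLenTokenAux (pvWin s p M) (j - p + 1) (count + 1) = some (m + 1 - p)
        rw [show j - p + 1 = j + 1 - p by omega]
        exact ih (j + 1) (count + 1) m (by omega) (by omega) hic' hmM
      · obtain ⟨hd2, hic'⟩ := ISTEP_close s j count m hic hc hlt
        rw [hc]
        show getLenTokenAux (pvWin s p M) (j - p + 1) (count - 1) = some (m + 1 - p)
        rw [show j - p + 1 = j + 1 - p by omega]
        exact ih (j + 1) (count - 1) m (by omega) (by omega) hic' hmM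
      · obtain ⟨_, hic'⟩ := ISTEP_other s j count m hic hc1 hc2
        simp only [if_neg hc1, if_neg hc2]
        rw [show j - p + 1 = j + 1 - p by omega]
        exact ih (j + 1) count m (by omega) (by omega) hic' hmM

-- ---- digit runs: get_len_nbr on a window equals B's digitEnd ----
theorem digitEnd_le_len (s : List Char) (j : Nat) (h : j ≤ s.length) :
    digitEnd s j ≤ s.length := by
  fun_induction digitEnd <;> omega

theorem digitEnd_le_of_nondigit (s : List Char) (j q : Nat) (hjq : j ≤ q)
    (hq : q < s.length) (hnd : ¬('0' ≤ s[q] ∧ s[q] ≤ '9')) : digitEnd s j ≤ q := by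
  fun_induction digitEnd with
  | case1 j hj hd ih =>
    rcases Nat.eq_or_lt_of_le hjq with he | hlt
    · subst he; exact absurd hd hnd
    · exact ih (by omega)
  | case2 j hj hd => omega
  | case3 j hj => omega

theorem nbr_win (s : List Char) (p M : Nat) (hM : M ≤ s.length) :
    ∀ k j, s.length - j ≤ k → p < j → j ≤ M →
      (M = s.length ∨ ∃ q, j ≤ q ∧ q < M ∧ ∃ hq : q < s.length, ¬('0' ≤ s[q] ∧ s[q] ≤ '9')) →
      getLenNbrAux (pvWin s p M) (j - p) = digitEnd s j - p := by
  intro k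
  induction k with
  | zero =>
    intro j hk hpj hjM hstop
    have hj : j = s.length := by
      rcases hstop with he | ⟨q, hq1, hq2, hq3, _⟩ <;> omega
    have hjM' : j = M := by
      rcases hstop with he | ⟨q, hq1, hq2, hq3, _⟩ <;> omega
    have hnone : (pvWin s p M)[j - p]? = none := by
      apply List.getElem?_eq_none
      simp [pvWin]
      omega
    rw [getLenNbrAux]
    have hde : digitEnd s j = j := by rw [digitEnd]; simp; omega
    rw [hde]
    split
    · rfl
    · rename_i c hc'; rw [hnone] at hc'; exact absurd hc' (by simp)
  | succ k ih =>
    intro j hk hpj hjM hstop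
    by_cases hjn : j < s.length
    · by_cases hjM' : j < M
      · have hread : (pvWin s p M)[j - p]? = some (s[j]'hjn) := by
          rw [pvWin_getElem? s p M (j - p) (by omega),
            show p + (j - p) = j by omega, List.getElem?_eq_getElem hjn]
        rw [getLenNbrAux]
        split
        · rename_i hc'; rw [hread] at hc'; exact absurd hc' (by simp)
        rename_i c hc'
        rw [hread] at hc'
        injection hc' with hc''
        subst hc''
        by_cases hdig : '0' ≤ s[j]'hjn ∧ s[j]'hjn ≤ '9'
        · rw [if_pos hdig]
          have hde : digitEnd s j = digitEnd s (j + 1) := by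
            rw [digitEnd, dif_pos hjn, if_pos hdig]
          rw [hde, show j - p + 1 = j + 1 - p by omega]
          apply ih (j + 1) (by omega) (by omega) (by omega)
          rcases hstop with he | ⟨q, hq1, hq2, hq3, hq4⟩
          · exact Or.inl he
          · refine Or.inr ⟨q, ?_, hq2, hq3, hq4⟩
            rcases Nat.eq_or_lt_of_le hq1 with he' | _
            · exfalso; subst he'; exact hq4 hdig
            · omega
        · rw [if_neg hdig]
          have hde : digitEnd s j = j := by rw [digitEnd, dif_pos hjn, if_neg hdig]
          rw [hde]
      · exfalso
        rcases hstop with he | ⟨q, hq1, hq2, hq3, _⟩ <;> omega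
    · have hjM'' : j = M := by
        rcases hstop with he | ⟨q, hq1, hq2, hq3, _⟩ <;> omega
      have hnone : (pvWin s p M)[j - p]? = none := by
        apply List.getElem?_eq_none
        simp [pvWin]
        omega
      rw [getLenNbrAux]
      have hde : digitEnd s j = j := by rw [digitEnd]; simp; omega
      rw [hde]
      split
      · rfl
      · rename_i c hc'; rw [hnone] at hc'; exact absurd hc' (by simp)

-- ---- "red" occurrences ----
def RedIn (s : List Char) (a b : Nat) : Bool := decide (∃ q, q < b ∧ a ≤ q ∧ redAt s q = true)

theorem redAt_elim (s : List Char) (q : Nat) (h : redAt s q = true) :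
    q + 3 ≤ s.length ∧ s[q]? = some 'r' ∧ s[q + 1]? = some 'e' ∧ s[q + 2]? = some 'd' := by
  simp only [redAt, decide_eq_true_eq] at h
  have hlen := congrArg List.length h
  simp [List.length_take, List.length_drop] at hlen
  have h0 := congrArg (fun l => l[0]?) h
  have h1 := congrArg (fun l => l[1]?) h
  have h2 := congrArg (fun l => l[2]?) h
  simp only [List.getElem?_take_of_lt (by omega : (0:Nat) < 3),
    List.getElem?_take_of_lt (by omega : (1:Nat) < 3),
    List.getElem?_take_of_lt (by omega : (2:Nat) < 3), List.getElem?_drop] at h0 h1 h2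
  refine ⟨by omega, ?_, ?_, ?_⟩
  · simpa using h0
  · simpa using h1
  · simpa using h2

theorem red_win (s : List Char) (a b : Nat) (hab : a ≤ b) (hb : b ≤ s.length) :
    PySem.Chars.isIn ['r', 'e', 'd'] (pvWin s a b)
      = decide (∃ q, q < b ∧ a ≤ q ∧ q + 3 ≤ b ∧ redAt s q = true) := by
  rw [Bool.eq_iff_iff, decide_eq_true_eq, ← PySem.Chars.exists_prefix_drop_iff_isIn]
  constructor
  · rintro ⟨j, hpre⟩
    rw [pvWin_drop] at hpre
    have htake := List.prefix_iff_eq_take.mp hpre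
    by_cases hfit : a + j + 3 ≤ b
    · refine ⟨a + j, by omega, by omega, by omega, ?_⟩
      simp only [redAt, decide_eq_true_eq]
      have hth : (pvWin s (a + j) b).take 3 = (s.drop (a + j)).take 3 := by
        rw [pvWin_take]
        unfold pvWin
        congr 1
        omega
      have htake' : (pvWin s (a + j) b).take 3 = ['r', 'e', 'd'] := by
        simpa using htake.symm
      rw [← hth]
      exact htake'
    · exfalso
      have hlen := congrArg List.length htake
      simp [pvWin] at hlen
      omega
  · rintro ⟨q, hq1, hq2, hq3, hred⟩
    refine ⟨q - a, ?_⟩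
    rw [pvWin_drop, show a + (q - a) = q by omega, List.prefix_iff_eq_take,
      show (['r', 'e', 'd'] : List Char).length = 3 from rfl]
    have hth : (pvWin s q b).take 3 = (s.drop q).take 3 := by
      rw [pvWin_take]
      unfold pvWin
      congr 1
      omega
    rw [hth]
    simp only [redAt, decide_eq_true_eq] at hred
    exact hred.symm

-- a "red" occurrence below a closing brace fits strictly inside the braces
theorem red_clip_close (s : List Char) (c : Nat) (hc : c < s.length) (h : s[c] = '}') (a : Nat) :
    (decide (∃ q, q < c + 1 ∧ a ≤ q ∧ q + 3 ≤ c + 1 ∧ redAt s q = true)) = RedIn s a (c + 1) := by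
  simp only [RedIn, decide_eq_decide]
  constructor
  · rintro ⟨q, h1, h2, h3, h4⟩
    exact ⟨q, h1, h2, h4⟩
  · rintro ⟨q, h1, h2, h3⟩
    obtain ⟨hlen, hr, he, hd⟩ := redAt_elim s q h3
    refine ⟨q, h1, h2, ?_, h3⟩
    have hne0 : c ≠ q := by
      intro hcq; subst hcq
      rw [List.getElem?_eq_getElem hc, h] at hr
      exact absurd (Option.some.inj hr) (by decide)
    have hne1 : c ≠ q + 1 := by
      intro hcq; subst hcq
      rw [List.getElem?_eq_getElem hc, h] at he
      exact absurd (Option.some.inj he) (by decide)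
    have hne2 : c ≠ q + 2 := by
      intro hcq; subst hcq
      rw [List.getElem?_eq_getElem hc, h] at hd
      exact absurd (Option.some.inj hd) (by decide)
    omega

-- ---- the red prefix table ----
def countRed (s : List Char) (k : Nat) : Nat := (List.range k).countP (fun q => redAt s q)

theorem countRed_succ (s : List Char) (k : Nat) :
    countRed s (k + 1) = countRed s k + (if redAt s k then 1 else 0) := by
  unfold countRed
  rw [List.range_succ, List.countP_append]
  simp [List.countP_cons]

theorem buildPrefPair_eq (s : List Char) :
    buildPrefPair s = ((List.range (s.length + 1)).map (countRed s), countRed s s.length) := by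
  unfold buildPrefPair
  have h : ∀ k, k ≤ s.length →
      (List.range k).foldl
        (fun pc q =>
          let c' := if redAt s q then pc.2 + 1 else pc.2
          (pc.1 ++ [c'], c'))
        ([0], 0)
      = ((List.range (k + 1)).map (countRed s), countRed s k) := by
    intro k
    induction k with
    | zero => intro _; simp [countRed]
    | succ k ih =>
      intro hk
      rw [List.range_succ, List.foldl_append, ih (by omega)]
      simp only [List.foldl_cons, List.foldl_nil]
      rw [List.range_succ (n := k + 1), List.map_append]
      have : countRed s (k + 1) = if redAt s k then countRed s k + 1 else countRed s k := by
        rw [countRed_succ]; split <;> omega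
      simp [this]
  exact h s.length le_rfl

theorem buildPref_get (s : List Char) (k : Nat) (hk : k ≤ s.length) :
    (buildPref s)[k]? = some (countRed s k) := by
  unfold buildPref
  rw [buildPrefPair_eq]
  simp only [List.getElem?_map, List.getElem?_range (by omega : k < s.length + 1)]
  rfl

theorem countRed_mono (s : List Char) (a b : Nat) (h : a ≤ b) :
    countRed s a ≤ countRed s b := by
  induction b with
  | zero =>
    have : a = 0 := by omega
    subst this
    exact le_rfl
  | succ b ih =>
    rcases Nat.eq_or_lt_of_le h with he | hlt
    · subst he
      exact le_rfl
    · have := ih (by omega)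
      rw [countRed_succ]
      split <;> omega

theorem countRed_eq_iff (s : List Char) (a b : Nat) (hab : a ≤ b) :
    countRed s a = countRed s b ↔ ∀ q, a ≤ q → q < b → redAt s q = false := by
  induction b with
  | zero =>
    have ha : a = 0 := by omega
    subst ha
    simp
  | succ b ih =>
    rcases Nat.eq_or_lt_of_le hab with he | hlt
    · subst he
      constructor
      · intro _ q h1 h2
        exact absurd (Nat.lt_of_le_of_lt h1 h2) (lt_irrefl _)
      · intro _; rfl
    · have hab' : a ≤ b := by omega
      have hmono := countRed_mono s a b hab'
      have hsucc := countRed_succ s b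
      constructor
      · intro h
        have hb0 : redAt s b = false ∧ countRed s a = countRed s b := by
          by_cases hr : redAt s b = true
          · exfalso
            rw [hr] at hsucc
            simp at hsucc
            omega
          · rw [Bool.not_eq_true] at hr
            rw [hr] at hsucc
            simp at hsucc
            exact ⟨hr, by omega⟩
        intro q hq1 hq2
        by_cases hqb : q = b
        · subst hqb; exact hb0.1
        · exact (ih hab').mp hb0.2 q hq1 (by omega)
      · intro h
        have h1 : countRed s a = countRed s b :=
          (ih hab').mpr (fun q hq1 hq2 => h q hq1 (by omega))
        have h2 : redAt s b = false := h b hab' (by omega)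
        rw [hsucc, h2]
        simp [h1]

theorem RedIn_iff_countRed (s : List Char) (a b : Nat) (hab : a ≤ b) :
    RedIn s a b = false ↔ countRed s b = countRed s a := by
  rw [show (countRed s b = countRed s a) ↔ (countRed s a = countRed s b) from eq_comm,
    countRed_eq_iff s a b hab]
  simp only [RedIn, decide_eq_false_iff_not]
  constructor
  · intro h q hq1 hq2
    by_cases h' : redAt s q = true
    · exact absurd ⟨q, hq2, hq1, h'⟩ h
    · rwa [Bool.not_eq_true] at h'
  · rintro h ⟨q, h1, h2, h3⟩
    rw [h q h2 h1] at h3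
    exact absurd h3 (by simp)

-- ---- the brace-matching table: stack pairing = first balance crossing ----
def StInv (s : List Char) (k : Nat) (st : List Nat) : Prop :=
  (∀ t, (h : t < st.length) → st[t] < k ∧ s[st[t]]? = some '{' ∧
      (∀ r, st[t] + 1 ≤ r → r ≤ k → balTo s (st[t] + 1) ≤ balTo s r) ∧
      balTo s k - balTo s (st[t] + 1) = (t : Int)) ∧
  (∀ p, p < k → s[p]? = some '{' →
      (∀ r, p + 1 ≤ r → r ≤ k → balTo s (p + 1) ≤ balTo s r) → p ∈ st)

def DictInv (s : List Char) (k : Nat) (d : PySem.Dict Nat Nat) : Prop :=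
  ∀ p m, d.get? p = some m ↔ (m < k ∧ s[p]? = some '{' ∧ IsClose s (p + 1) 1 m)

theorem bmGo_correct (s : List Char) :
    ∀ cs k d st, cs = s.drop k → k ≤ s.length → StInv s k st → DictInv s k d →
      DictInv s s.length (bmGo cs k d st).1 := by
  intro cs
  induction cs with
  | nil =>
    intro k d st hcs hk hst hd
    have : k = s.length := by
      have := congrArg List.length hcs
      simp at this
      omega
    subst this
    simpa [bmGo] using hd
  | cons c rest ih =>
    intro k d st hcs hk hst hd
    have hkn : k < s.length := by
      by_contra h
      rw [List.drop_eq_nil_of_le (by omega)] at hcs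
      exact absurd hcs (by simp)
    have hdk : s.drop k = s[k]'hkn :: s.drop (k + 1) := List.drop_eq_getElem_cons hkn
    rw [hdk] at hcs
    have hcgk : s[k]'hkn = c := by
      have := (List.cons.injEq c rest (s[k]'hkn) (s.drop (k + 1))).mp hcs
      exact this.1.symm
    have hck : s[k]? = some c := by
      rw [List.getElem?_eq_getElem hkn, hcgk]
    have hrest : rest = s.drop (k + 1) := by
      have := (List.cons.injEq c rest (s[k]'hkn) (s.drop (k + 1))).mp hcs
      exact this.2
    have hbal := balTo_succ s k hkn
    rw [hcgk] at hbal
    simp only [bmGo]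
    by_cases hop : c = '{'
    · rw [if_pos hop]
      subst hop
      have hdel : pvDelta '{' = 1 := by decide
      rw [hdel] at hbal
      apply ih (k + 1) d (k :: st) hrest (by omega)
      · constructor
        · intro t ht
          cases t with
          | zero =>
            simp only [List.getElem_cons_zero]
            refine ⟨by omega, hck, ?_, by push_cast; omega⟩
            intro r hr1 hr2
            have : r = k + 1 := by omega
            subst this
            omega
          | succ t' =>
            simp only [List.getElem_cons_succ]
            have ht' : t' < st.length := by simpa using ht
            obtain ⟨h1, h2, h3, h4⟩ := hst.1 t' ht'
            refine ⟨by omega, h2, ?_, by push_cast; omega⟩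
            intro r hr1 hr2
            rcases Nat.eq_or_lt_of_le hr2 with he | hlt
            · subst he
              have := h3 k (by omega) le_rfl
              omega
            · exact h3 r hr1 (by omega)
        · intro p hp hcp hopen
          by_cases hpk : p = k
          · subst hpk; simp
          · have hpk' : p < k := by omega
            right
            apply hst.2 p hpk' hcp
            intro r hr1 hr2
            exact hopen r hr1 (by omega)
      · -- dict unchanged: nothing closes at k when s[k] = '{'
        intro p m
        rw [hd p m]
        constructor
        · rintro ⟨h1, h2, h3⟩; exact ⟨by omega, h2, h3⟩
        · rintro ⟨h1, h2, h3⟩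
          refine ⟨?_, h2, h3⟩
          rcases Nat.lt_or_ge m k with h | h
          · exact h
          · exfalso
            have hmk : m = k := by omega
            obtain ⟨hx1, hx2, hx3, hx4⟩ := h3
            have h5 := hx4 k (by omega) (by omega)
            rw [hmk] at hx3
            omega
    · rw [if_neg hop]
      by_cases hcl : c = '}'
      · rw [if_pos hcl]
        subst hcl
        have hdel : pvDelta '}' = -1 := by decide
        rw [hdel] at hbal
        cases st with
        | nil =>
          apply ih (k + 1) d [] hrest (by omega)
          · constructor
            · intro t ht; simp at ht
            · intro p hp hcp hopen
              exfalso
              have hpk : p < k := by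
                rcases Nat.lt_or_ge p k with h | h
                · exact h
                · exfalso
                  have : p = k := by omega
                  subst this
                  rw [hck] at hcp
                  exact absurd (Option.some.inj hcp) (by decide)
              have : p ∈ ([] : List Nat) := by
                apply hst.2 p hpk hcp
                intro r hr1 hr2
                exact hopen r hr1 (by omega)
              simp at this
          · intro p m
            rw [hd p m]
            constructor
            · rintro ⟨h1, h2, h3⟩; exact ⟨by omega, h2, h3⟩
            · rintro ⟨h1, h2, h3⟩
              refine ⟨?_, h2, h3⟩
              rcases Nat.lt_or_ge m k with h | h
              · exact h
              · exfalso
                have hmk : m = k := by omega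
                obtain ⟨hx1, hx2, hx3, hx4⟩ := h3
                have hpmem : p ∈ ([] : List Nat) := by
                  apply hst.2 p (by omega) h2
                  intro r hr1 hr2
                  have := hx4 r hr1 (by omega)
                  omega
                simp at hpmem
        | cons p0 st' =>
          obtain ⟨hs1, hs2, hs3, hs4⟩ := hst.1 0 (by simp)
          simp only [List.getElem_cons_zero] at hs1 hs2 hs3 hs4
          simp only [Nat.cast_zero] at hs4
          have hic : IsClose s (p0 + 1) 1 k := by
            refine ⟨by omega, hkn, by omega, ?_⟩
            intro r hr1 hr2
            have := hs3 r hr1 hr2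
            omega
          apply ih (k + 1) (d.insert p0 k) st' hrest (by omega)
          · constructor
            · intro t ht
              obtain ⟨h1, h2, h3, h4⟩ := hst.1 (t + 1) (by simpa using Nat.succ_lt_succ ht)
              simp only [List.getElem_cons_succ] at h1 h2 h3 h4
              push_cast at h4
              refine ⟨by omega, h2, ?_, by push_cast; omega⟩
              intro r hr1 hr2
              rcases Nat.eq_or_lt_of_le hr2 with he | hlt
              · subst he
                omega
              · exact h3 r hr1 (by omega)
            · intro p hp hcp hopen
              have hne : p ≠ p0 := by
                intro he
                subst he
                have := hopen (k + 1) (by omega) le_rfl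
                omega
              have : p ∈ p0 :: st' := by
                apply hst.2 p ?_ hcp
                · intro r hr1 hr2
                  exact hopen r hr1 (by omega)
                · rcases Nat.lt_or_ge p k with h | h
                  · exact h
                  · exfalso
                    have : p = k := by omega
                    subst this
                    rw [hck] at hcp
                    exact absurd (Option.some.inj hcp) (by decide)
              simpa [hne] using this
          · intro p m
            rw [PySem.Dict.get?_insert]
            by_cases hpp : p = p0
            · subst hpp
              rw [if_pos rfl]
              constructor
              · intro h
                injection h with h
                subst h
                exact ⟨by omega, hs2, hic⟩
              · rintro ⟨h1, h2, h3⟩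
                have : m = k := IC_unique s (p + 1) 1 m k h3 hic
                rw [this]
            · rw [if_neg hpp, hd p m]
              constructor
              · rintro ⟨h1, h2, h3⟩; exact ⟨by omega, h2, h3⟩
              · rintro ⟨h1, h2, h3⟩
                refine ⟨?_, h2, h3⟩
                rcases Nat.lt_or_ge m k with h | h
                · exact h
                · exfalso
                  have hmk : m = k := by omega
                  obtain ⟨hx1, hx2, hx3, hx4⟩ := h3
                  rw [hmk] at hx3
                  have hpmem : p ∈ p0 :: st' := by
                    apply hst.2 p (by omega) h2
                    intro r hr1 hr2
                    have := hx4 r hr1 (by omega)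
                    omega
                  have hpne : p ∈ st' := by simpa [hpp] using hpmem
                  obtain ⟨t, ht, hte⟩ := List.mem_iff_getElem.mp hpne
                  obtain ⟨h1', h2', h3', h4'⟩ := hst.1 (t + 1) (by simpa using Nat.succ_lt_succ ht)
                  simp only [List.getElem_cons_succ] at h1' h2' h3' h4'
                  rw [hte] at h4'
                  push_cast at h4'
                  omega
      · rw [if_neg hcl]
        have hdel : pvDelta c = 0 := by
          rcases pvDelta_cases c with ⟨h, _⟩ | ⟨h, _⟩ | ⟨_, _, h⟩
          · exact absurd h hop
          · exact absurd h hcl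
          · exact h
        rw [hdel] at hbal
        apply ih (k + 1) d st hrest (by omega)
        · constructor
          · intro t ht
            obtain ⟨h1, h2, h3, h4⟩ := hst.1 t ht
            refine ⟨by omega, h2, ?_, by omega⟩
            intro r hr1 hr2
            rcases Nat.eq_or_lt_of_le hr2 with he | hlt
            · subst he
              have := h3 k (by omega) le_rfl
              omega
            · exact h3 r hr1 (by omega)
          · intro p hp hcp hopen
            have hpk : p < k := by
              rcases Nat.lt_or_ge p k with h | h
              · exact h
              · exfalso
                have : p = k := by omega
                subst this
                rw [hck] at hcp
                exact hop (Option.some.inj hcp)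
            apply hst.2 p hpk hcp
            intro r hr1 hr2
            exact hopen r hr1 (by omega)
        · intro p m
          rw [hd p m]
          constructor
          · rintro ⟨h1, h2, h3⟩; exact ⟨by omega, h2, h3⟩
          · rintro ⟨h1, h2, h3⟩
            refine ⟨?_, h2, h3⟩
            rcases Nat.lt_or_ge m k with h | h
            · exact h
            · exfalso
              have hmk : m = k := by omega
              obtain ⟨hx1, hx2, hx3, hx4⟩ := h3
              have h5 := hx4 k (by omega) (by omega)
              rw [hmk] at hx3
              omega

theorem buildMatch_get (s : List Char) (p m : Nat) :
    (buildMatch s).get? p = some m ↔ (s[p]? = some '{' ∧ IsClose s (p + 1) 1 m) := by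
  have h := bmGo_correct s s 0 PySem.Dict.empty [] (by simp) (by omega)
    ⟨fun t ht => by simp at ht, fun p hp => by omega⟩
    (fun p m => by
      simp only [PySem.Dict.get?_empty]
      constructor
      · intro h; exact absurd h (by simp)
      · rintro ⟨h1, _, _⟩; omega)
  rw [buildMatch, h p m]
  constructor
  · rintro ⟨_, h2, h3⟩; exact ⟨h2, h3⟩
  · rintro ⟨h2, h3⟩; exact ⟨h3.2.1, h2, h3⟩

-- ---- the loop-exit shape of A on a window ----
theorem exitA (s : List Char) (a b i : Nat) (acc : Int) (hab : a ≤ b) (hbn : b ≤ s.length)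
    (hbi : b ≤ i)
    (hend : b = s.length ∨ (b < s.length ∧ s[b]? = some '}')) :
    calcAAux (pvWin s a (if b = s.length then s.length else b + 1)) (i - a) acc = some acc := by
  rcases hend with he | ⟨hb, hcb⟩
  · rw [if_pos he]
    rw [calcAAux, dif_neg]
    rw [pvWin_len s a s.length (by omega) le_rfl]
    omega
  · rw [if_neg (by omega)]
    have hlen : (pvWin s a (b + 1)).length = b + 1 - a := pvWin_len s a (b + 1) (by omega) (by omega)
    rcases Nat.eq_or_lt_of_le hbi with he | hlt
    · rw [show i - a = b - a from by omega]
      rw [calcAAux, dif_pos (by omega)]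
      have hget : (pvWin s a (b + 1))[b - a]'(by omega) = '}' := by
        have h1 : (pvWin s a (b + 1))[b - a]? = s[b]? := by
          rw [pvWin_getElem? s a (b + 1) (b - a) (by omega)]
          congr 1
          omega
        rw [hcb, List.getElem?_eq_getElem (by omega : b - a < (pvWin s a (b + 1)).length)] at h1
        exact Option.some.inj h1
      rw [hget]
      rw [if_neg (by decide), if_neg (by decide)]
      rw [calcAAux, dif_neg (by omega)]
    · rw [calcAAux, dif_neg (by omega)]

-- ---- the loop-exit shape of both sides together ----
theorem BOUND (s : List Char) (mt : PySem.Dict Nat Nat) (pref : List Nat) (a b i : Nat)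
    (acc : Int) (hab : a ≤ b) (hbn : b ≤ s.length) (hbi : b ≤ i)
    (hend : b = s.length ∨ (b < s.length ∧ s[b]? = some '}')) :
    calcAAux (pvWin s a (if b = s.length then s.length else b + 1)) (i - a) acc
      = spanGo s mt pref b i acc := by
  rw [exitA s a b i acc hab hbn hbi hend, spanGo, dif_neg (by omega)]

-- ---- the master simulation: A on a window = B on the span ----
theorem CENT (s : List Char)
    (P1 : ∀ p, p < s.length → s[p]? = some '{' → ∃ m, m < s.length ∧ IsClose s (p + 1) 1 m) :
    ∀ K a b, b - a ≤ K → a ≤ b →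
      (b = s.length ∨ IsClose s a 1 b) →
      ∀ L i acc, b + 1 - i ≤ L → a ≤ i →
        calcAAux (pvWin s a (if b = s.length then s.length else b + 1)) (i - a) acc
          = spanGo s (buildMatch s) (buildPref s) b i acc := by
  intro K
  induction K with
  | zero =>
    intro a b hK hab hspan L i acc hL hai
    have hbn : b ≤ s.length := by
      rcases hspan with he | hic
      · omega
      · have := hic.2.1; omega
    have hend : b = s.length ∨ (b < s.length ∧ s[b]? = some '}') := by
      rcases hspan with he | hic
      · exact Or.inl he
      · refine Or.inr ⟨hic.2.1, ?_⟩
        rw [List.getElem?_eq_getElem hic.2.1, IC_closebrace s a 1 b hic]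
    exact BOUND s _ _ a b i acc hab hbn (by omega) hend
  | succ K ihK =>
    intro a b hK hab hspan
    have hbn : b ≤ s.length := by
      rcases hspan with he | hic
      · omega
      · have := hic.2.1; omega
    have hend : b = s.length ∨ (b < s.length ∧ s[b]? = some '}') := by
      rcases hspan with he | hic
      · exact Or.inl he
      · refine Or.inr ⟨hic.2.1, ?_⟩
        rw [List.getElem?_eq_getElem hic.2.1, IC_closebrace s a 1 b hic]
    intro L
    induction L with
    | zero =>
      intro i acc hL hai
      exact BOUND s _ _ a b i acc hab hbn (by omega) hend
    | succ L ihL =>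
      intro i acc hL hai
      by_cases hib : i < b
      · -- main step: i is scanned by both sides
        have hin : i < s.length := by omega
        have hbbA : b ≤ (if b = s.length then s.length else b + 1) := by
          split <;> omega
        have hbAn : (if b = s.length then s.length else b + 1) ≤ s.length := by
          split
          · omega
          · rcases hend with he | ⟨h1, _⟩
            · omega
            · omega
        have hlen : (pvWin s a (if b = s.length then s.length else b + 1)).length
            = (if b = s.length then s.length else b + 1) - a :=
          pvWin_len s a _ (by omega) hbAn
        have hgetw : (pvWin s a (if b = s.length then s.length else b + 1))[i - a]'(by omega)
            = s[i]'hin := by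
          have h1 : (pvWin s a (if b = s.length then s.length else b + 1))[i - a]? = s[i]? := by
            rw [pvWin_getElem? s a _ (i - a) (by omega)]
            congr 1
            omega
          rw [List.getElem?_eq_getElem hin,
            List.getElem?_eq_getElem (by omega :
              i - a < (pvWin s a (if b = s.length then s.length else b + 1)).length)] at h1
          exact Option.some.inj h1
        have hdrop : (pvWin s a (if b = s.length then s.length else b + 1)).drop (i - a)
            = pvWin s i (if b = s.length then s.length else b + 1) := by
          rw [pvWin_drop]
          congr 1
          omega
        have hdrop1 : (pvWin s a (if b = s.length then s.length else b + 1)).drop (i - a + 1)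
            = pvWin s (i + 1) (if b = s.length then s.length else b + 1) := by
          rw [pvWin_drop]
          congr 1
          omega
        rw [calcAAux, dif_pos (by omega :
          i - a < (pvWin s a (if b = s.length then s.length else b + 1)).length)]
        rw [spanGo, dif_pos hib, List.getElem?_eq_getElem hin]
        simp only [hgetw, hdrop, hdrop1]
        by_cases hc : s[i]'hin = '{'
        · -- object branch
          rw [if_pos hc, if_pos hc]
          have hgq : s[i]? = some '{' := by rw [List.getElem?_eq_getElem hin, hc]
          obtain ⟨m, hmb, hicm⟩ : ∃ m, m < b ∧ IsClose s (i + 1) 1 m := by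
            obtain ⟨m, hmn, hic⟩ := P1 i hin hgq
            rcases hspan with he | hspn
            · exact ⟨m, by omega, hic⟩
            · exact ⟨m, IC_nest s a b i m hspn hai hib hin hc hic, hic⟩
          have him : i + 1 ≤ m := hicm.1
          have hmn : m < s.length := hicm.2.1
          have hm1bA : m + 1 ≤ (if b = s.length then s.length else b + 1) := by
            split <;> omega
          have htok : getLenToken (pvWin s i (if b = s.length then s.length else b + 1))
              = some (m + 1 - i) := by
            unfold getLenToken
            have h := tok_win s i (if b = s.length then s.length else b + 1) hbAn
              (m + 1) (i + 1) 1 m (by omega) (by omega) hicm (by omega)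
            rw [show i + 1 - i = 1 from by omega] at h
            exact h
          have hinner : (pvWin s (i + 1) (if b = s.length then s.length else b + 1)).take
                (m + 1 - i - 1) = pvWin s (i + 1) (m + 1) := by
            rw [pvWin_take,
              show min (i + 1 + (m + 1 - i - 1)) (if b = s.length then s.length else b + 1)
                = m + 1 from by omega]
          have hred : PySem.Chars.isIn ['r', 'e', 'd'] (pvWin s (i + 1) (m + 1))
              = RedIn s (i + 1) (m + 1) := by
            rw [red_win s (i + 1) (m + 1) (by omega) (by omega)]
            exact red_clip_close s m hmn (IC_closebrace s (i + 1) 1 m hicm) (i + 1)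
          have hmt : (buildMatch s).get? i = some m := (buildMatch_get s i m).mpr ⟨hgq, hicm⟩
          have hp1 : (buildPref s)[m + 1]? = some (countRed s (m + 1)) :=
            buildPref_get s (m + 1) (by omega)
          have hp2 : (buildPref s)[i + 1]? = some (countRed s (i + 1)) :=
            buildPref_get s (i + 1) (by omega)
          rw [htok, hmt]
          dsimp only
          rw [dif_pos (show i < m ∧ m < b from ⟨by omega, hmb⟩), hp1, hp2]
          dsimp only
          rw [hinner, hred]
          by_cases hR : RedIn s (i + 1) (m + 1) = true
          · rw [if_pos hR]
            have hxy : ¬(countRed s (m + 1) = countRed s (i + 1)) := by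
              intro h
              have := (RedIn_iff_countRed s (i + 1) (m + 1) (by omega)).mpr h
              rw [hR] at this
              simp at this
            rw [if_neg hxy]
            rw [show i - a + (m + 1 - i) + 1 = (m + 2) - a from by omega]
            exact ihL (m + 2) acc (by omega) (by omega)
          · rw [Bool.not_eq_true] at hR
            rw [if_neg (by rw [hR]; simp : ¬ RedIn s (i + 1) (m + 1) = true)]
            have hxy : countRed s (m + 1) = countRed s (i + 1) :=
              (RedIn_iff_countRed s (i + 1) (m + 1) (by omega)).mp hR
            rw [if_pos hxy]
            have hchild := ihK (i + 1) m (by omega) (by omega) (Or.inr hicm)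
              (m + 2) (i + 1) 0 (by omega) (by omega)
            rw [if_neg (show ¬ m = s.length from by omega), Nat.sub_self] at hchild
            rw [hchild]
            cases hv : spanGo s (buildMatch s) (buildPref s) m (i + 1) 0 with
            | none => rfl
            | some v =>
              rw [show i - a + (m + 1 - i) + 1 = (m + 2) - a from by omega]
              exact ihL (m + 2) (acc + v) (by omega) (by omega)
        · rw [if_neg hc, if_neg hc]
          by_cases hc2 : s[i]'hin = '-' ∨ ('0' ≤ s[i]'hin ∧ s[i]'hin ≤ '9')
          · -- number branch
            rw [if_pos hc2, if_pos hc2]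
            have hgb : ∀ h1 : b < s.length, s[b]? = some '}' → s[b]'h1 = '}' := by
              intro h1 h2
              rw [List.getElem?_eq_getElem h1] at h2
              exact Option.some.inj h2
            have hstop : (if b = s.length then s.length else b + 1) = s.length ∨
                ∃ q, i + 1 ≤ q ∧ q < (if b = s.length then s.length else b + 1) ∧
                  ∃ hq : q < s.length, ¬('0' ≤ s[q] ∧ s[q] ≤ '9') := by
              rcases hend with he | ⟨h1, h2⟩
              · rw [if_pos he]
                exact Or.inl rfl
              · rw [if_neg (by omega)]
                refine Or.inr ⟨b, by omega, by omega, h1, ?_⟩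
                rw [hgb h1 h2]
                decide
            have hln : getLenNbr (pvWin s i (if b = s.length then s.length else b + 1))
                = digitEnd s (i + 1) - i := by
              have h := nbr_win s i (if b = s.length then s.length else b + 1) hbAn
                s.length (i + 1) (by omega) (by omega) (by omega) hstop
              rw [show i + 1 - i = 1 from by omega] at h
              exact h
            have hjj1 : i + 1 ≤ digitEnd s (i + 1) := digitEnd_ge s (i + 1)
            have hjjbA : digitEnd s (i + 1) ≤ (if b = s.length then s.length else b + 1) := by
              rcases hend with he | ⟨h1, h2⟩
              · rw [if_pos he]
                exact digitEnd_le_len s (i + 1) (by omega)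
              · rw [if_neg (by omega)]
                have := digitEnd_le_of_nondigit s (i + 1) b (by omega) h1
                  (by rw [hgb h1 h2]; decide)
                omega
            have htok : (pvWin s i (if b = s.length then s.length else b + 1)).take
                  (getLenNbr (pvWin s i (if b = s.length then s.length else b + 1)))
                = (s.drop i).take (digitEnd s (i + 1) - i) := by
              rw [hln, pvWin_take]
              rw [show min (i + (digitEnd s (i + 1) - i))
                    (if b = s.length then s.length else b + 1) = digitEnd s (i + 1) from by omega]
              rfl
            rw [htok, hln]
            cases hv : PySem.Int.ofChars? ((s.drop i).take (digitEnd s (i + 1) - i)) with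
            | none => rfl
            | some v =>
              rw [show i - a + (digitEnd s (i + 1) - i) + 1 = (digitEnd s (i + 1) + 1) - a
                from by omega]
              exact ihL (digitEnd s (i + 1) + 1) (acc + v) (by omega) (by omega)
          · -- plain character
            rw [if_neg hc2, if_neg hc2]
            rw [show i - a + 1 = (i + 1) - a from by omega]
            exact ihL (i + 1) acc (by omega) (by omega)
      · exact BOUND s _ _ a b i acc hab hbn (by omega) hend

-- ===== VERDICT (by name: the statement is the Claim_ definition above) =====
theorem calc_answer_spec : Claim_equal_calc_answer := by
  intro line hdom hpre
  unfold Spec_calc_answer calc_answer calc_answer_alt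
  obtain ⟨hp1, hp2⟩ := hpre
  have P1 : ∀ p, p < line.toList.length → line.toList[p]? = some '{' →
      ∃ m, m < line.toList.length ∧ IsClose line.toList (p + 1) 1 m := by
    intro p hp hc
    obtain ⟨m, hm⟩ := IC_exists line.toList hp1 p hp
      (by rw [List.getElem?_eq_getElem hp] at hc; exact Option.some.inj hc)
    exact ⟨m, hm.2.1, hm⟩
  have h := CENT line.toList P1 line.toList.length 0 line.toList.length (by omega) (by omega)
    (Or.inl rfl) (line.toList.length + 1) 0 0 (by omega) (by omega)
  rw [if_pos rfl] at h
  have hw : pvWin line.toList 0 line.toList.length = line.toList := by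
    simp [pvWin]
  rw [hw] at h
  simp only [Nat.sub_zero] at h
  rw [h]
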